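-- pv_equiv track=rewrite | github.com/rycowhi/sql-glider | src/sqlglider/graph/formatters.py | parse_schema_text
-- ===== SOURCE A (Python) =====
-- from typing import Dict
--
-- SchemaDict = Dict[str, Dict[str, str]]
--
-- def parse_schema_text(content: str) -> SchemaDict:
--     """Parse schema from indented text format.
--
--     Expected format:
--         table_name
--           column1
--           column2
--
--         other_table
--           col_a
--
--     Args:
--         content: Text-formatted schema string.
--
--     Returns:
--         Parsed schema dictionary.
--     """
--     schema: SchemaDict = {}
--     current_table: str | None = None
--     for line in content.splitlines():
--         if not line or not line.strip():
--             continue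
--         if line.startswith("  "):
--             if current_table is not None:
--                 schema[current_table][line.strip()] = "UNKNOWN"
--         else:
--             current_table = line.strip()
--             schema[current_table] = {}
--     return schema
-- ===== SOURCE B (Python) =====
-- def parse_schema_text(content):
--     """Recursive-descent re-implementation: drop blank lines, skip pre-header
--     column lines, then consume one header plus its run of indented lines per step."""
--     lines = [l for l in content.splitlines() if l.strip()]
--     schema = {}
--     i = 0
--     # column lines before any header are ignored
--     while i < len(lines) and lines[i].startswith("  "):
--         i += 1
--     while i < len(lines):
--         header = lines[i].strip()
--         i += 1
--         cols = []
--         while i < len(lines) and lines[i].startswith("  "):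
--             cols.append(lines[i].strip())
--             i += 1
--         schema[header] = {c: "UNKNOWN" for c in cols}
--     return schema
-- ===== Notes on version B (the rewrite author's own statement) =====
-- stated objective: alternative
-- what changed: A mutates a dict-of-dicts while tracking the current table in a single stateful line loop; B first filters blank lines, then runs a recursive-descent grouping that consumes one header and its whole run of indented lines per step, building each table's column dict at once.
import Mathlib
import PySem

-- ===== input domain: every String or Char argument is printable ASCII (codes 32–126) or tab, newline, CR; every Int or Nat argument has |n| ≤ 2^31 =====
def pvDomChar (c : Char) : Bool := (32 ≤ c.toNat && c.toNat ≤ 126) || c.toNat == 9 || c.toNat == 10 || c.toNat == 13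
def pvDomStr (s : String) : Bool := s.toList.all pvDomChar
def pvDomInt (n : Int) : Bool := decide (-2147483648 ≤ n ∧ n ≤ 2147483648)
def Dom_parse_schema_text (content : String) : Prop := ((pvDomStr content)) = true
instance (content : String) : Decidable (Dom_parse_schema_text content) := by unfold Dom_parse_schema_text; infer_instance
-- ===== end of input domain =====

-- B replaces A's stateful one-pass dict mutation by a filter + recursive-descent grouping
-- of one header and its run of indented lines per step (objective: alternative decomposition).

-- ===== PORT A =====
-- one loop step of A: skip blank, indented column line into schema[current], else new table.
-- schema[current_table][col] = "UNKNOWN" is ported as modify with default Dict.empty: the key is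
-- always present when current_table is some (A never raises), so this is exact.
def pvStepA (st : PySem.Dict String (PySem.Dict String String) × Option String) (line : String) :
    PySem.Dict String (PySem.Dict String String) × Option String :=
  if line = "" ∨ PySem.Str.strip line = "" then st
  else if PySem.Str.startswith line "  " then
    match st.2 with
    | none => st
    | some t => ((st.1).modify t PySem.Dict.empty
        (fun inner => inner.insert (PySem.Str.strip line) "UNKNOWN"), st.2)
  else
    ((st.1).insert (PySem.Str.strip line) PySem.Dict.empty, some (PySem.Str.strip line))

def parse_schema_text (content : String) : List (String × List (String × String)) :=
  (((PySem.Str.splitlines content).foldl pvStepA (PySem.Dict.empty, none)).1).items.map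
    (fun p => (p.1, p.2.items))

-- ===== PORT B =====
def pvIndented (l : String) : Bool := PySem.Str.startswith l "  "

-- the nested while loops of Source B: one header plus its run of indented lines per step
def pvBlocks : List String → List (String × List String)
  | [] => []
  | h :: rest =>
      (PySem.Str.strip h, (rest.takeWhile pvIndented).map PySem.Str.strip)
        :: pvBlocks (rest.dropWhile pvIndented)
termination_by ls => ls.length
decreasing_by exact Nat.lt_succ_of_le (List.length_dropWhile_le _ _)

def parse_schema_text_alt (content : String) : List (String × List (String × String)) :=
  let lines := (PySem.Str.splitlines content).filter (fun l => PySem.Str.strip l ≠ "")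
  let bs := pvBlocks (lines.dropWhile pvIndented)
  ((bs.foldl (fun (d : PySem.Dict String (PySem.Dict String String)) p =>
      d.insert p.1 (p.2.foldl (fun (m : PySem.Dict String String) c => m.insert c "UNKNOWN")
        PySem.Dict.empty)) PySem.Dict.empty)).items.map (fun p => (p.1, p.2.items))

-- ===== PRECONDITION & SPEC =====
def Spec_parse_schema_text (content : String) (out : List (String × List (String × String))) : Prop := out = parse_schema_text_alt content
instance (content : String) (out : List (String × List (String × String))) : Decidable (Spec_parse_schema_text content out) := by unfold Spec_parse_schema_text; infer_instance

-- ===== CLAIM (what is proved, stated in full; the proofs are below) =====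
def Claim_equal_parse_schema_text : Prop := ∀ (content : String), Dom_parse_schema_text content → Spec_parse_schema_text content (parse_schema_text content)

-- ===== LEMMAS AND PROOFS =====

-- B's render of a block list
def pvRender (bs : List (String × List String)) (d : PySem.Dict String (PySem.Dict String String)) :
    PySem.Dict String (PySem.Dict String String) :=
  bs.foldl (fun d p => d.insert p.1 (p.2.foldl
    (fun (m : PySem.Dict String String) c => m.insert c "UNKNOWN") PySem.Dict.empty)) d

lemma pvStepA_blank (st : PySem.Dict String (PySem.Dict String String) × Option String)
    (line : String) (h : PySem.Str.strip line = "") : pvStepA st line = st := by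
  simp [pvStepA, h]

lemma pvStrip_empty : PySem.Str.strip "" = "" := by decide

-- A's fold ignores blank lines: fold over the filtered list is the same
lemma pvFoldA_filter (ls : List String)
    (st : PySem.Dict String (PySem.Dict String String) × Option String) :
    ls.foldl pvStepA st = (ls.filter (fun l => PySem.Str.strip l ≠ "")).foldl pvStepA st := by
  induction ls generalizing st with
  | nil => rfl
  | cons l ls ih =>
      by_cases h : PySem.Str.strip l = ""
      · simp [h, pvStepA_blank _ _ h, ih]
      · simp [h, ih]

lemma pvStepA_col (d : PySem.Dict String (PySem.Dict String String)) (t : String)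
    (inner : PySem.Dict String String) (l : String)
    (hnb : PySem.Str.strip l ≠ "") (hind : pvIndented l = true) :
    pvStepA (d.insert t inner, some t) l
      = (d.insert t (inner.insert (PySem.Str.strip l) "UNKNOWN"), some t) := by
  have hne : l ≠ "" := fun h => hnb (h ▸ pvStrip_empty)
  have hi : PySem.Chars.startswith l.toList [' ', ' '] = true := by simpa [pvIndented] using hind
  simp [pvStepA, hne, hnb, hi, PySem.Dict.modify,
    PySem.Dict.getD_insert_self, PySem.Dict.insert_insert_self]

lemma pvStepA_header (st : PySem.Dict String (PySem.Dict String String) × Option String)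
    (l : String) (hnb : PySem.Str.strip l ≠ "") (hind : pvIndented l = false) :
    pvStepA st l = ((st.1).insert (PySem.Str.strip l) PySem.Dict.empty,
      some (PySem.Str.strip l)) := by
  have hne : l ≠ "" := fun h => hnb (h ▸ pvStrip_empty)
  have hi : PySem.Chars.startswith l.toList [' ', ' '] = false := by simpa [pvIndented] using hind
  simp [pvStepA, hne, hnb, hi]

-- main invariant while a table is open
lemma pvMainSome (ls : List String) :
    ∀ (d : PySem.Dict String (PySem.Dict String String)) (t : String)
      (inner : PySem.Dict String String),
      (∀ l ∈ ls, PySem.Str.strip l ≠ "") →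
      (ls.foldl pvStepA (d.insert t inner, some t)).1
        = pvRender (pvBlocks (ls.dropWhile pvIndented))
            (d.insert t ((ls.takeWhile pvIndented).foldl
              (fun (m : PySem.Dict String String) c => m.insert (PySem.Str.strip c) "UNKNOWN")
              inner)) := by
  induction ls with
  | nil => intro d t inner _; simp [pvRender, pvBlocks]
  | cons l ls ih =>
      intro d t inner hnb
      have hl := hnb l (List.mem_cons_self ..)
      have hls : ∀ x ∈ ls, PySem.Str.strip x ≠ "" := fun x hx => hnb x (List.mem_cons_of_mem _ hx)
      by_cases hind : pvIndented l = true
      · rw [List.foldl_cons, pvStepA_col d t inner l hl hind, ih _ _ _ hls,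
          List.dropWhile_cons_of_pos hind, List.takeWhile_cons_of_pos hind, List.foldl_cons]
      · have hind' : pvIndented l = false := by simpa using hind
        rw [List.foldl_cons, pvStepA_header _ l hl hind',
          ih (d.insert t inner) (PySem.Str.strip l) PySem.Dict.empty hls,
          List.dropWhile_cons_of_neg (by simp [hind']),
          List.takeWhile_cons_of_neg (by simp [hind'])]
        show _ = pvRender (pvBlocks (l :: ls)) (d.insert t (List.foldl _ inner []))
        rw [pvBlocks]
        simp only [List.foldl_nil, pvRender, List.foldl_cons, List.foldl_map]

lemma pvMainNone (ls : List String) :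
    ∀ (d : PySem.Dict String (PySem.Dict String String)),
      (∀ l ∈ ls, PySem.Str.strip l ≠ "") →
      (ls.foldl pvStepA (d, none)).1 = pvRender (pvBlocks (ls.dropWhile pvIndented)) d := by
  induction ls with
  | nil => intro d _; simp [pvRender, pvBlocks]
  | cons l ls ih =>
      intro d hnb
      have hl := hnb l (List.mem_cons_self ..)
      have hne : l ≠ "" := fun h => hl (h ▸ pvStrip_empty)
      have hls : ∀ x ∈ ls, PySem.Str.strip x ≠ "" := fun x hx => hnb x (List.mem_cons_of_mem _ hx)
      by_cases hind : pvIndented l = true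
      · have : pvStepA (d, none) l = (d, none) := by
          have hi : PySem.Chars.startswith l.toList [' ', ' '] = true := by
            simpa [pvIndented] using hind
          simp [pvStepA, hne, hl, hi]
        rw [List.foldl_cons, this, ih d hls, List.dropWhile_cons_of_pos hind]
      · have hind' : pvIndented l = false := by simpa using hind
        rw [List.foldl_cons, pvStepA_header _ l hl hind',
          pvMainSome ls d (PySem.Str.strip l) PySem.Dict.empty hls,
          List.dropWhile_cons_of_neg (by simp [hind'])]
        rw [pvBlocks]
        simp only [pvRender, List.foldl_cons, List.foldl_map]

-- ===== VERDICT (by name: the statement is the Claim_ definition above) =====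
theorem parse_schema_text_spec : Claim_equal_parse_schema_text := by
  intro content _
  show parse_schema_text content = parse_schema_text_alt content
  unfold parse_schema_text parse_schema_text_alt
  rw [pvFoldA_filter,
    pvMainNone _ PySem.Dict.empty (fun l hl => by
      have := List.of_mem_filter hl
      simpa using this)]
  rfl
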